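-- pv_equiv track=rewrite | github.com/ImPaniking/GeekBrainStudy | Pytnon_first_study/03.HomeWork/03.Home_Work_Penschii_Artiom/01.Task.py | sum_of_not_numbers_in_array
-- ===== SOURCE A (Python) =====
-- def sum_of_not_numbers_in_array(list_of_numbers:list) -> int:
--     """Counts sum of ellements thet are on not even positions
--
--     Args:
--         list_of_numbers (list): array in wich sum of ellements shuld ocure
--
--     Returns:
--         int: sum of elements
--     """
--     # если индекс не чётный - увеличивает сумму на значение под индексом
--     sum = 0
--     index = 0
--     for i in list_of_numbers:
--         # if list_of_numbers.index(i) % 2 == 0: # хотел по интересному сделать, но понял что штука не работает при двойных значениях =)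
--         if index % 2 != 0:
--             sum += i
--         index += 1
--
--     return sum
-- ===== SOURCE B (Python) =====
-- def sum_of_not_numbers_in_array(list_of_numbers:list) -> int:
--     """Counts sum of ellements thet are on not even positions
--
--     Args:
--         list_of_numbers (list): array in wich sum of ellements shuld ocure
--
--     Returns:
--         int: sum of elements
--     """
--     return sum(list_of_numbers[1::2])
-- ===== Notes on version B (the rewrite author's own statement) =====
-- stated objective: idiomatic
-- what changed: Replaces the explicit loop with a counter and parity branch by selecting the odd-indexed elements up front with the stride-2 slice [1::2] and summing them directly.
import Mathlib
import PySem

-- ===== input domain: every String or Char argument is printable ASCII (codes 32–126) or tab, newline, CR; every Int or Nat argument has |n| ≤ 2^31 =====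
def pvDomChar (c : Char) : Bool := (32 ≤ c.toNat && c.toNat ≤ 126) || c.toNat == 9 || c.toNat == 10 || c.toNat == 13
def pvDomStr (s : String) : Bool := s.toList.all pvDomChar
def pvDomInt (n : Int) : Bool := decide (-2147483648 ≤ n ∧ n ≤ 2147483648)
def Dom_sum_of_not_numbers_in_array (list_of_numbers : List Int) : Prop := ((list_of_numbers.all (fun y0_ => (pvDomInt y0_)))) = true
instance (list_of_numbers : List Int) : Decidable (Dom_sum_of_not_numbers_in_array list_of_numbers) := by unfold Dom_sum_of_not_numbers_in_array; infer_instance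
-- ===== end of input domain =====

-- B replaces A's loop/counter/parity-branch by summing the stride-2 slice [1::2]; same O(n) cost, more idiomatic.

-- ===== PORT A =====
-- loop: sum, index accumulated over the elements; branch on index % 2 != 0
def sum_of_not_numbers_in_array (list_of_numbers : List Int) : Int :=
  (list_of_numbers.foldl
    (fun (st : Int × Int) i =>
      ((if st.2 % 2 ≠ 0 then st.1 + i else st.1), st.2 + 1))
    (0, 0)).1

-- ===== PORT B =====
-- sum(list_of_numbers[1::2])
def sum_of_not_numbers_in_array_alt (list_of_numbers : List Int) : Int :=
  ((PySem.List.slice? list_of_numbers (some 1) none 2).getD []).sum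

-- ===== PRECONDITION & SPEC =====
def Spec_sum_of_not_numbers_in_array (list_of_numbers : List Int) (out : Int) : Prop := out = sum_of_not_numbers_in_array_alt list_of_numbers
instance (list_of_numbers : List Int) (out : Int) : Decidable (Spec_sum_of_not_numbers_in_array list_of_numbers out) := by unfold Spec_sum_of_not_numbers_in_array; infer_instance

-- ===== CLAIM (what is proved, stated in full; the proofs are below) =====
def Claim_equal_sum_of_not_numbers_in_array : Prop := ∀ (list_of_numbers : List Int), Dom_sum_of_not_numbers_in_array list_of_numbers → Spec_sum_of_not_numbers_in_array list_of_numbers (sum_of_not_numbers_in_array list_of_numbers)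

-- ===== LEMMAS AND PROOFS =====

-- the elements of a list sitting at odd indices (proof-side characterisation)
def oddElems : List Int → List Int
  | [] => []
  | [_] => []
  | _ :: b :: t => b :: oddElems t

theorem length_oddElems (xs : List Int) : (oddElems xs).length = xs.length / 2 := by
  induction xs using oddElems.induct with
  | case1 => simp [oddElems]
  | case2 => simp [oddElems]
  | case3 a b t ih => simp [oddElems, ih]; omega

theorem getElem_oddElems (xs : List Int) (k : Nat) (h : k < (oddElems xs).length)
    (h' : 2 * k + 1 < xs.length) : (oddElems xs)[k] = xs[2 * k + 1] := by
  induction xs using oddElems.induct generalizing k with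
  | case1 => simp [oddElems] at h
  | case2 => simp [oddElems] at h
  | case3 a b t ih =>
    cases k with
    | zero => simp [oddElems]
    | succ k =>
      simp only [oddElems, List.getElem_cons_succ] at h ⊢
      simp only [show 2 * (k + 1) = 2 * k + 1 + 1 from by omega, List.getElem_cons_succ]
      exact ih k (by simpa using h) (by simp only [List.length_cons] at h'; omega)

theorem filterMap_congr_some {α β : Type} (f : α → Option β) (g : α → β) :
    ∀ (l : List α), (∀ x ∈ l, f x = some (g x)) → l.filterMap f = l.map g := by
  intro l
  induction l with
  | nil => simp
  | cons a t ih =>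
    intro h
    simp [h a (by simp), ih (fun x hx => h x (by simp [hx]))]

theorem slice?_odd (xs : List Int) :
    PySem.List.slice? xs (some 1) none 2 = some (oddElems xs) := by
  cases xs with
  | nil => decide
  | cons a t =>
    cases t with
    | nil =>
      norm_num [PySem.List.slice?, PySem.List.sliceIndices, oddElems]
    | cons b t2 =>
      -- length ≥ 2: start = 1, stop = n, count = n / 2
      set xs : List Int := a :: b :: t2 with hxs
      have hn : 2 ≤ xs.length := by simp [hxs]
      simp only [PySem.List.slice?, PySem.List.sliceIndices]
      norm_num
      have hmin : min (1 : Int) (xs.length : Int) = 1 := by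
        have : (2 : Int) ≤ (xs.length : Int) := by exact_mod_cast hn
        omega
      rw [hmin]
      rw [if_pos (show 1 < xs.length by omega)]

      have hcount : ((((xs.length : Int) - 1 + 2 - 1) / 2)).toNat = xs.length / 2 := by
        have : ((xs.length : Int) - 1 + 2 - 1) = (xs.length : Int) := by ring
        rw [this]
        omega
      rw [hcount]
      -- every probed index is in range, so the filterMap is a map
      rw [filterMap_congr_some _ (fun k => xs.getD (2 * k + 1) 0)]
      · apply List.ext_getElem
        · simp [length_oddElems]
        · intro k h1 h2
          have hk : k < xs.length / 2 := by simpa using h1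
          have hidx : 2 * k + 1 < xs.length := by omega
          simp only [List.getElem_map, List.getElem_range]
          rw [List.getD_eq_getElem _ _ hidx, getElem_oddElems xs k h2 hidx]
      · intro k hk
        have hk' : k < xs.length / 2 := by simpa using hk
        have hidx : 2 * k + 1 < xs.length := by omega
        have harith : ((1 : Int) + 2 * (k : Int)).toNat = 2 * k + 1 := by omega
        rw [harith, List.getElem?_eq_getElem hidx, List.getD_eq_getElem _ _ hidx]

-- the elements at even indices (what A's branch picks when the counter starts odd)
def evenElems : List Int → List Int
  | [] => []
  | a :: t => a :: oddElems t

theorem oddElems_cons (x : Int) (l : List Int) : oddElems (x :: l) = evenElems l := by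
  cases l <;> rfl

theorem foldA_sum (xs : List Int) :
    ∀ (s idx : Int),
      (xs.foldl (fun (st : Int × Int) i =>
        ((if st.2 % 2 ≠ 0 then st.1 + i else st.1), st.2 + 1)) (s, idx)).1
      = s + (if idx % 2 ≠ 0 then (evenElems xs).sum else (oddElems xs).sum) := by
  induction xs using oddElems.induct with
  | case1 => intro s idx; simp [oddElems, evenElems]
  | case2 x =>
    intro s idx
    simp only [List.foldl_cons, List.foldl_nil, oddElems, evenElems, List.sum_cons,
      List.sum_nil]
    split_ifs <;> omega
  | case3 a b t ih =>
    intro s idx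
    simp only [List.foldl_cons]
    rw [ih]
    simp only [oddElems_cons, oddElems, evenElems, List.sum_cons]
    have hA : ((idx + 1 + 1) % 2 ≠ 0) ↔ (idx % 2 ≠ 0) := by omega
    have hB : ((idx + 1) % 2 ≠ 0) ↔ ¬ (idx % 2 ≠ 0) := by omega
    simp only [hA, hB]
    split_ifs with h <;> ring

-- ===== VERDICT (by name: the statement is the Claim_ definition above) =====
theorem sum_of_not_numbers_in_array_spec : Claim_equal_sum_of_not_numbers_in_array := by
  intro xs _
  show _ = _
  unfold sum_of_not_numbers_in_array sum_of_not_numbers_in_array_alt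
  rw [slice?_odd, foldA_sum]
  simp
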